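-- pv_equiv track=rewrite | github.com/Riib11/MathSummer2018 | associahedra/KTrees/tree.py | number_leaves
-- ===== SOURCE A (Python) =====
-- def number_leaves(s):
--     result = ""
--     x = 1
--     for c in s:
--         if c == "*":
--             result += str(x)
--             x += 1
--         else:
--             result += c
--     return result
-- ===== SOURCE B (Python) =====
-- def number_leaves(s):
--     parts = s.split("*")
--     out = [parts[0]]
--     for i, p in enumerate(parts[1:], 1):
--         out.append(str(i) + p)
--     return "".join(out)
-- ===== Notes on version B (the rewrite author's own statement) =====
-- stated objective: idiomatic
-- what changed: B splits the string on the star character once and joins the segments with the incrementing leaf numbers inserted in the gaps, instead of A's character-by-character loop with a mutable counter and quadratic string concatenation.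
import Mathlib
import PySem

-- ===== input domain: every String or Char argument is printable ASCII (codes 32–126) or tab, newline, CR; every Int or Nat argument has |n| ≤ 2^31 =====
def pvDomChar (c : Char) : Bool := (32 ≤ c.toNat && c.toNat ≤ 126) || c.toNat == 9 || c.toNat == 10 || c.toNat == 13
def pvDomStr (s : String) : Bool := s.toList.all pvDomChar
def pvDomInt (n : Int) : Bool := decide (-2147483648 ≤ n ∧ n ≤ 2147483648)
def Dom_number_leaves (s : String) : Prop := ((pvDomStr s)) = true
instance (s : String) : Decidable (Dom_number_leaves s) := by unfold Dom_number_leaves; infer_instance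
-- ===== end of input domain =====

-- B splits the string on '*' once and joins the segments with the incrementing leaf
-- numbers in the gaps, instead of A's character-by-character loop (objective: idiomatic).

-- ===== PORT A =====
-- the 'for c in s' loop: state (result, x); str(x) ported as PySem.Int.toChars
def numberLeavesLoop : List Char → List Char → Int → List Char
  | [], res, _ => res
  | c :: t, res, x =>
    if c = '*' then numberLeavesLoop t (res ++ PySem.Int.toChars x) (x + 1)
    else numberLeavesLoop t (res ++ [c]) x

def number_leaves (s : String) : String :=
  String.mk (numberLeavesLoop s.toList [] 1)

-- ===== PORT B =====
-- 'for i, p in enumerate(parts[1:], 1): out.append(str(i)+p)' — counter i = running index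
def numberLeavesTail : List (List Char) → Int → List Char
  | [], _ => []
  | p :: ps, i => PySem.Int.toChars i ++ p ++ numberLeavesTail ps (i + 1)

-- s.split('*') ported as the library split on an element, List.splitOn (keeps empty parts)
def number_leaves_alt (s : String) : String :=
  let parts := s.toList.splitOn '*'
  String.mk (parts.headD [] ++ numberLeavesTail parts.tail 1)

-- ===== PRECONDITION & SPEC =====
def Spec_number_leaves (s : String) (out : String) : Prop := out = number_leaves_alt s
instance (s : String) (out : String) : Decidable (Spec_number_leaves s out) := by unfold Spec_number_leaves; infer_instance

-- ===== CLAIM (what is proved, stated in full; the proofs are below) =====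
def Claim_equal_number_leaves : Prop := ∀ (s : String), Dom_number_leaves s → Spec_number_leaves s (number_leaves s)

-- ===== LEMMAS AND PROOFS =====

-- common characterisation: the numbered string of l with next leaf number x
def nlSpec : List Char → Int → List Char
  | [], _ => []
  | c :: t, x => if c = '*' then PySem.Int.toChars x ++ nlSpec t (x + 1) else c :: nlSpec t x

theorem numberLeavesLoop_eq (l : List Char) : ∀ (res : List Char) (x : Int),
    numberLeavesLoop l res x = res ++ nlSpec l x := by
  induction l with
  | nil => intro res x; simp [numberLeavesLoop, nlSpec]
  | cons c t ih =>
    intro res x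
    by_cases h : c = '*' <;> simp [numberLeavesLoop, nlSpec, h, ih]

theorem splitOn_interleave (l : List Char) : ∀ (x : Int),
    (l.splitOn '*').headD [] ++ numberLeavesTail (l.splitOn '*').tail x = nlSpec l x := by
  induction l with
  | nil => intro x; simp [List.splitOn, List.splitOnP_nil, numberLeavesTail, nlSpec]
  | cons c t ih =>
    intro x
    have hne : t.splitOn '*' ≠ [] := List.splitOnP_ne_nil _ _
    obtain ⟨p, ps, hps⟩ := List.exists_cons_of_ne_nil hne
    by_cases h : c = '*'
    · subst h
      have iht := ih (x + 1)
      rw [hps] at iht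
      simp only [List.headD, List.tail] at iht
      simp only [List.splitOn, List.splitOnP_cons, beq_self_eq_true, if_true]
      simp only [List.splitOn] at hps
      rw [hps]
      simp only [List.headD, List.tail, numberLeavesTail, nlSpec,
        List.nil_append, List.append_assoc, iht]
      simp
    · have iht := ih x
      rw [hps] at iht
      simp only [List.headD, List.tail] at iht
      have hb : (c == '*') = false := by simp [h]
      simp only [List.splitOn, List.splitOnP_cons, hb, Bool.false_eq_true, if_false]
      simp only [List.splitOn] at hps
      rw [hps]
      simp only [List.modifyHead, List.headD, List.tail, nlSpec, if_neg h,
        List.cons_append, iht]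

-- ===== VERDICT (by name: the statement is the Claim_ definition above) =====
theorem number_leaves_spec : Claim_equal_number_leaves := by
  intro s _
  unfold Spec_number_leaves number_leaves number_leaves_alt
  show _ = _
  simp only [numberLeavesLoop_eq, splitOn_interleave, List.nil_append]
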